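-- pv_equiv track=rewrite | github.com/AndrewHatswell/X-Oo | Plus.py | plus_piece
-- ===== SOURCE A (Python) =====
-- def plus_piece(last_tile, tile):
--     x = 1
--     while x <= 3:
--         if tile == (last_tile-(x*1)) or tile == (last_tile+(x*1)) or tile == (last_tile-(x*4)) or tile == (last_tile+(x*4)):
--             return True
--         elif x <= 3:
--             x += 1
--         else:
--             return False
-- ===== SOURCE B (Python) =====
-- def plus_piece(last_tile, tile):
--     if abs(tile - last_tile) in {1, 2, 3, 4, 8, 12}:
--         return True
-- ===== Notes on version B (the rewrite author's own statement) =====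
-- stated objective: simpler
-- what changed: Replaces A's offset-generating while loop over x=1..3 with a single membership test of abs(tile-last_tile) against the prebuilt offset set {1,2,3,4,8,12}, falling off the end (None) on no match exactly as A does.
import Mathlib
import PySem

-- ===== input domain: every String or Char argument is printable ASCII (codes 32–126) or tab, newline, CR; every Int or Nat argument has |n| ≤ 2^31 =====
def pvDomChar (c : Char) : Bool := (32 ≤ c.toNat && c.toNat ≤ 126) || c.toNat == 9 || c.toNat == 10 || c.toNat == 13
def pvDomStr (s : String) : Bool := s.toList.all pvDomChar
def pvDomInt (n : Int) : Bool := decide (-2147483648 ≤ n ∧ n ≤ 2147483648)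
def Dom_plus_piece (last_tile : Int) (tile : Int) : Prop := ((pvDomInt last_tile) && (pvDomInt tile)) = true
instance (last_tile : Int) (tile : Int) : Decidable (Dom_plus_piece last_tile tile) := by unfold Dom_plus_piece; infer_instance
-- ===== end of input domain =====

-- B: single membership test of abs(tile-last_tile) in the prebuilt offset set, instead of A's while loop; objective: simpler.
-- ===== PORT A =====
-- while loop of A: x runs 1,2,3; returns True on a matching offset, otherwise falls off the loop (None).
def plusLoopA (last_tile : Int) (tile : Int) (x : Int) : Option Bool :=
  if _h : x ≤ 3 then
    if tile = last_tile - x * 1 ∨ tile = last_tile + x * 1 ∨ tile = last_tile - x * 4 ∨ tile = last_tile + x * 4 then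
      some true
    else if x ≤ 3 then
      plusLoopA last_tile tile (x + 1)
    else
      some false
  else
    none
termination_by (4 - x).toNat
decreasing_by omega

def plus_piece (last_tile : Int) (tile : Int) : Option Bool :=
  plusLoopA last_tile tile 1

-- ===== PORT B =====
def plus_piece_alt (last_tile : Int) (tile : Int) : Option Bool :=
  if ([1, 2, 3, 4, 8, 12] : List Int).contains |tile - last_tile| then some true else none

-- ===== PRECONDITION & SPEC =====
def Spec_plus_piece (last_tile : Int) (tile : Int) (out : Option Bool) : Prop := out = plus_piece_alt last_tile tile
instance (last_tile : Int) (tile : Int) (out : Option Bool) : Decidable (Spec_plus_piece last_tile tile out) := by unfold Spec_plus_piece; infer_instance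

-- ===== CLAIM (what is proved, stated in full; the proofs are below) =====
def Claim_equal_plus_piece : Prop := ∀ (last_tile : Int) (tile : Int), Dom_plus_piece last_tile tile → Spec_plus_piece last_tile tile (plus_piece last_tile tile)

-- ===== LEMMAS AND PROOFS =====

-- ===== VERDICT (by name: the statement is the Claim_ definition above) =====
theorem plus_piece_spec : Claim_equal_plus_piece := by
  intro last_tile tile _
  unfold Spec_plus_piece
  unfold plus_piece plus_piece_alt
  rw [plusLoopA, plusLoopA, plusLoopA, plusLoopA]
  simp only [List.contains_cons, List.contains_nil]
  rcases abs_cases (tile - last_tile) with ⟨he, _⟩ | ⟨he, _⟩ <;> rw [he] <;>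
    split_ifs <;> simp_all <;> omega
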